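-- pv_equiv track=rewrite | github.com/smilestar13/HillelSchoolPythonBasic | HW29_Generate_cube_numbers.py | generate_cube_numbers
-- ===== SOURCE A (Python) =====
-- def generate_cube_numbers(start_num):
--     i = 2
--     while True:
--         fin_num = i**3
--         i += 1
--         if start_num > fin_num:
--             yield fin_num
--         else:
--             break
-- ===== SOURCE B (Python) =====
-- def generate_cube_numbers(start_num):
--     # Binary-search the smallest b >= 2 with b**3 >= start_num, then yield
--     # cubes from a bounded range instead of testing inside an unbounded loop.
--     if start_num <= 8:
--         return
--     lo, hi = 2, start_num
--     while lo < hi: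
--         mid = (lo + hi) // 2
--         if mid ** 3 < start_num:
--             lo = mid + 1
--         else:
--             hi = mid
--     for i in range(2, lo):
--         yield i ** 3
-- ===== Notes on version B (the rewrite author's own statement) =====
-- stated objective: alternative
-- what changed: B determines the upper index by an integer binary search for the smallest b with b**3 >= start_num and then yields cubes over a bounded range, instead of A's unbounded while loop that tests start_num > i**3 on every iteration.
import Mathlib
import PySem

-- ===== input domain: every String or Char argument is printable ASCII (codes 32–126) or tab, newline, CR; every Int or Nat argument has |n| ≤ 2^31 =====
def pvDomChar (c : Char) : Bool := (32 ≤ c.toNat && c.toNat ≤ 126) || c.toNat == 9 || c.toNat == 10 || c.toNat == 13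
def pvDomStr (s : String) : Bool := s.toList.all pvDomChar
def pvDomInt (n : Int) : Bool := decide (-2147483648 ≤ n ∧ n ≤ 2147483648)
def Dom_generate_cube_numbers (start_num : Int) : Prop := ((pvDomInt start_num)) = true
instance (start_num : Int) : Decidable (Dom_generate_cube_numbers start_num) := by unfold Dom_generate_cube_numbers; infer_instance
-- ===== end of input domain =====

-- B replaces A's unbounded while-loop (tested each iteration) by an integer binary
-- search for the smallest b with b^3 >= start_num followed by a bounded range of cubes
-- (objective: alternative decomposition, not claimed faster).

-- cubes grow strictly: needed for the termination measure of A's loop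
theorem pvCubeLtCube {a b : Int} (h : a < b) : a ^ 3 < b ^ 3 := by
  nlinarith [sq_nonneg (a + b), sq_nonneg (a - b), sq_nonneg a, sq_nonneg b]

-- ===== PORT A =====
-- while True: fin_num = i**3; i += 1; if start_num > fin_num: yield fin_num else: break
def pvGenLoop (start_num i : Int) : List Int :=
  if h : start_num > i ^ 3 then (i ^ 3) :: pvGenLoop start_num (i + 1)
  else []
termination_by (start_num - i ^ 3).toNat
decreasing_by
  have := pvCubeLtCube (show i < i + 1 by omega)
  omega

def generate_cube_numbers (start_num : Int) : List Int := pvGenLoop start_num 2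

-- ===== PORT B =====
-- while lo < hi: mid = (lo+hi)//2; if mid**3 < start_num: lo = mid+1 else: hi = mid
def pvBsearch (start_num lo hi : Int) : Int :=
  if h : lo < hi then
    let mid := PySem.Int.floordiv (lo + hi) 2
    if mid ^ 3 < start_num then pvBsearch start_num (mid + 1) hi
    else pvBsearch start_num lo mid
  else lo
termination_by (hi - lo).toNat
decreasing_by
  · have hm : PySem.Int.floordiv (lo + hi) 2 = (lo + hi) / 2 :=
      PySem.Int.floordiv_eq_ediv_of_pos (by omega)
    simp only [hm]; omega
  · have hm : PySem.Int.floordiv (lo + hi) 2 = (lo + hi) / 2 :=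
      PySem.Int.floordiv_eq_ediv_of_pos (by omega)
    simp only [hm]; omega

def generate_cube_numbers_alt (start_num : Int) : List Int :=
  if start_num ≤ 8 then []
  else
    let lo := pvBsearch start_num 2 start_num
    (PySem.List.pyRange 2 lo 1).map (fun i => i ^ 3)

-- ===== PRECONDITION & SPEC =====
def Spec_generate_cube_numbers (start_num : Int) (out : List Int) : Prop := out = generate_cube_numbers_alt start_num
instance (start_num : Int) (out : List Int) : Decidable (Spec_generate_cube_numbers start_num out) := by unfold Spec_generate_cube_numbers; infer_instance

-- ===== CLAIM (what is proved, stated in full; the proofs are below) =====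
def Claim_equal_generate_cube_numbers : Prop := ∀ (start_num : Int), Dom_generate_cube_numbers start_num → Spec_generate_cube_numbers start_num (generate_cube_numbers start_num)

-- ===== LEMMAS AND PROOFS =====

theorem pvCubeLeCube {a b : Int} (h : a ≤ b) : a ^ 3 ≤ b ^ 3 := by
  rcases lt_or_eq_of_le h with h | h
  · exact le_of_lt (pvCubeLtCube h)
  · simp [h]

-- the binary search returns the least b in [lo, hi] with s ≤ b^3
theorem pvBsearch_spec (s : Int) : ∀ (n : Nat) (lo hi : Int), (hi - lo).toNat = n → lo ≤ hi → s ≤ hi ^ 3 →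
    lo ≤ pvBsearch s lo hi ∧ pvBsearch s lo hi ≤ hi ∧ s ≤ (pvBsearch s lo hi) ^ 3 ∧
      ∀ j : Int, lo ≤ j → j < pvBsearch s lo hi → j ^ 3 < s := by
  intro n
  induction n using Nat.strong_induction_on with
  | _ n ih =>
    intro lo hi hn hle hhi
    rw [pvBsearch]
    by_cases hlt : lo < hi
    · simp only [dif_pos hlt]
      have hm : PySem.Int.floordiv (lo + hi) 2 = (lo + hi) / 2 :=
        PySem.Int.floordiv_eq_ediv_of_pos (by omega)
      set mid := PySem.Int.floordiv (lo + hi) 2 with hmid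
      have hb1 : lo ≤ mid := by rw [hm]; omega
      have hb2 : mid < hi := by rw [hm]; omega
      by_cases hc : mid ^ 3 < s
      · simp only [if_pos hc]
        obtain ⟨h1, h2, h3, h4⟩ := ih ((hi - (mid + 1)).toNat) (by omega) (mid + 1) hi rfl (by omega) hhi
        refine ⟨by omega, h2, h3, ?_⟩
        intro j hj1 hj2
        by_cases hjm : j ≤ mid
        · exact lt_of_le_of_lt (pvCubeLeCube hjm) hc
        · exact h4 j (by omega) hj2
      · simp only [if_neg hc]
        obtain ⟨h1, h2, h3, h4⟩ := ih ((mid - lo).toNat) (by omega) lo mid rfl hb1 (by omega)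
        exact ⟨h1, by omega, h3, h4⟩
    · simp only [dif_neg hlt]
      have : lo = hi := le_antisymm hle (by omega)
      subst this
      exact ⟨le_refl _, le_refl _, hhi, by intro j h1 h2; omega⟩

-- A's loop produces exactly the cubes of [i, b) when b is the first index whose cube reaches s
theorem pvGenLoop_eq (s b : Int) (hb : s ≤ b ^ 3) : ∀ (n : Nat) (i : Int), (b - i).toNat = n → i ≤ b →
    (∀ j : Int, i ≤ j → j < b → j ^ 3 < s) →
    pvGenLoop s i = (PySem.List.pyRange i b 1).map (fun x => x ^ 3) := by
  intro n
  induction n using Nat.strong_induction_on with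
  | _ n ih =>
    intro i hn hi hsmall
    rw [pvGenLoop]
    by_cases hib : i < b
    · have hcond : s > i ^ 3 := hsmall i (le_refl _) hib
      simp only [dif_pos hcond]
      rw [PySem.List.pyRange_one_cons hib, List.map_cons,
        ih ((b - (i + 1)).toNat) (by omega) (i + 1) rfl (by omega)
          (fun j h1 h2 => hsmall j (by omega) h2)]
    · have : i = b := by omega
      subst this
      have hcond : ¬ s > i ^ 3 := not_lt.mpr hb
      simp only [dif_neg hcond]
      rw [PySem.List.pyRange_one_eq_nil (by omega)]
      simp

-- ===== VERDICT (by name: the statement is the Claim_ definition above) =====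
theorem generate_cube_numbers_spec : Claim_equal_generate_cube_numbers := by
  intro s _
  unfold Spec_generate_cube_numbers generate_cube_numbers generate_cube_numbers_alt
  by_cases hs : s ≤ 8
  · rw [if_pos hs, pvGenLoop, dif_neg (by norm_num; omega)]
  · simp only [if_neg hs]
    push Not at hs
    have hhi : s ≤ s ^ 3 := by nlinarith [sq_nonneg s, sq_nonneg (s - 1), hs]
    obtain ⟨h1, h2, h3, h4⟩ := pvBsearch_spec s ((s - 2).toNat) 2 s rfl (by omega) hhi
    exact pvGenLoop_eq s (pvBsearch s 2 s) h3 ((pvBsearch s 2 s - 2).toNat) 2 rfl h1 h4
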